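-- pv_equiv track=rewrite | github.com/gaaagaaa0/kazokulog | backend/app/main.py | fallback_get_suggestions
-- ===== SOURCE A (Python) =====
-- def fallback_get_suggestions(logs):
--     """Gemini APIが使用できない場合のフォールバック提案"""
--     if len(logs) == 0:
--         return [
--             "家族の日常を記録して、素敵な思い出を残しましょう",
--             "子どもたちとの時間を大切にして、コミュニケーションを増やしましょう",
--             "家族の健康管理に気をつけて、バランスの良い食事を心がけましょう"
--         ]
--
--     suggestions = []
--
--     # 感情ログが多い場合
--     emotion_logs = [log for log in logs if log.get('category') == 'emotion']
--     if len(emotion_logs) > 0: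
--         suggestions.append("お子さんの感情の変化を記録されていますね。家族で話し合う時間を作ってみましょう")
--
--     # 買い物ログが多い場合
--     shopping_logs = [log for log in logs if log.get('category') == 'shopping']
--     if len(shopping_logs) > 0:
--         suggestions.append("買い物リストを効率的に管理されていますね。週1回のまとめ買いを検討してみてはいかがでしょうか")
--
--     # 基本的な提案を追加
--     if len(suggestions) < 3:
--         default_suggestions = [
--             "家族でゆっくりと過ごす時間を作ってみませんか？",
--             "子どもたちとの会話を増やしてみるのはいかがでしょうか？",
--             "家族の健康管理に気をつけましょう"
--         ]
--         suggestions.extend(default_suggestions)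
--
--     return suggestions[:3]
-- ===== SOURCE B (Python) =====
-- def fallback_get_suggestions(logs):
--     """Gemini APIが使用できない場合のフォールバック提案"""
--     if len(logs) == 0:
--         return [
--             "家族の日常を記録して、素敵な思い出を残しましょう",
--             "子どもたちとの時間を大切にして、コミュニケーションを増やしましょう",
--             "家族の健康管理に気をつけて、バランスの良い食事を心がけましょう"
--         ]
--     # single short-circuit scan: collect categories, stop once both triggers are seen
--     seen = set()
--     for log in logs:
--         seen.add(log.get('category'))
--         if 'emotion' in seen and 'shopping' in seen:
--             break
--     # data-driven menu: (trigger category or None = unconditional default, text)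
--     menu = [
--         ('emotion', "お子さんの感情の変化を記録されていますね。家族で話し合う時間を作ってみましょう"),
--         ('shopping', "買い物リストを効率的に管理されていますね。週1回のまとめ買いを検討してみてはいかがでしょうか"),
--         (None, "家族でゆっくりと過ごす時間を作ってみませんか？"),
--         (None, "子どもたちとの会話を増やしてみるのはいかがでしょうか？"),
--         (None, "家族の健康管理に気をつけましょう"),
--     ]
--     return [text for cat, text in menu if cat is None or cat in seen][:3]
-- ===== Notes on version B (the rewrite author's own statement) =====
-- stated objective: alternative
-- what changed: B replaces A's two full filtering scans and imperative append chain by one short-circuit scan that accumulates the set of seen categories (breaking once both trigger categories are found) and a data-driven menu table [(trigger-or-None, text)] filtered by membership and truncated to 3.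
import Mathlib
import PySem

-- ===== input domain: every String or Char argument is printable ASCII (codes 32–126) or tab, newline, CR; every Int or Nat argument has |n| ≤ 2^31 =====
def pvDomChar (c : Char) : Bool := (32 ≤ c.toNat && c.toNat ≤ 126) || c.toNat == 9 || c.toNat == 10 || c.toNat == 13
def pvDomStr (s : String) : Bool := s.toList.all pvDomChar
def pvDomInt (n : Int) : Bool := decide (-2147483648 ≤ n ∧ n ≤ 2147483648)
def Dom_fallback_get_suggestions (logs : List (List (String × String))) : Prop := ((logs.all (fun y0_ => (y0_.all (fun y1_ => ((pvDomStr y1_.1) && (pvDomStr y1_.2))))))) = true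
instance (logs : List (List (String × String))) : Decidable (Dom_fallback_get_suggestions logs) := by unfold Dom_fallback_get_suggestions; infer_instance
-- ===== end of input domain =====

-- B is an alternative decomposition: one short-circuit scan collecting seen categories
-- (break once both triggers are found) plus a data-driven menu table filtered by membership,
-- instead of A's two full filtering scans and imperative append chain. Same cost class.

-- shared helper: log.get('category')
def pvCat (log : List (String × String)) : Option String :=
  (PySem.Dict.ofList log).get? "category"

-- ===== PORT A =====
def fallback_get_suggestions (logs : List (List (String × String))) : List String :=
  if logs.length = 0 then
    ["家族の日常を記録して、素敵な思い出を残しましょう",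
     "子どもたちとの時間を大切にして、コミュニケーションを増やしましょう",
     "家族の健康管理に気をつけて、バランスの良い食事を心がけましょう"]
  else
    let suggestions : List String := []
    let emotion_logs := logs.filter (fun log => pvCat log == some "emotion")
    let suggestions := if emotion_logs.length > 0 then
      suggestions ++ ["お子さんの感情の変化を記録されていますね。家族で話し合う時間を作ってみましょう"]
      else suggestions
    let shopping_logs := logs.filter (fun log => pvCat log == some "shopping")
    let suggestions := if shopping_logs.length > 0 then
      suggestions ++ ["買い物リストを効率的に管理されていますね。週1回のまとめ買いを検討してみてはいかがでしょうか"]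
      else suggestions
    let suggestions := if suggestions.length < 3 then
      suggestions ++ ["家族でゆっくりと過ごす時間を作ってみませんか？",
                      "子どもたちとの会話を増やしてみるのはいかがでしょうか？",
                      "家族の健康管理に気をつけましょう"]
      else suggestions
    PySem.List.slice suggestions none (some 3)

-- ===== PORT B =====
-- the for-loop with break: scan logs, adding each category to the seen set,
-- stopping as soon as both trigger categories are present
def pvScan : List (List (String × String)) → PySem.Set (Option String) → PySem.Set (Option String)
  | [], seen => seen
  | log :: rest, seen =>
    let seen' := PySem.Set.add seen (pvCat log)
    if PySem.Set.contains seen' (some "emotion") && PySem.Set.contains seen' (some "shopping")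
    then seen'
    else pvScan rest seen'

def pvMenu : List (Option String × String) :=
  [(some "emotion", "お子さんの感情の変化を記録されていますね。家族で話し合う時間を作ってみましょう"),
   (some "shopping", "買い物リストを効率的に管理されていますね。週1回のまとめ買いを検討してみてはいかがでしょうか"),
   (none, "家族でゆっくりと過ごす時間を作ってみませんか？"),
   (none, "子どもたちとの会話を増やしてみるのはいかがでしょうか？"),
   (none, "家族の健康管理に気をつけましょう")]

def fallback_get_suggestions_alt (logs : List (List (String × String))) : List String :=
  if logs.length = 0 then
    ["家族の日常を記録して、素敵な思い出を残しましょう",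
     "子どもたちとの時間を大切にして、コミュニケーションを増やしましょう",
     "家族の健康管理に気をつけて、バランスの良い食事を心がけましょう"]
  else
    let seen := pvScan logs PySem.Set.empty
    let picked := (pvMenu.filter (fun e =>
      match e.1 with
      | none => true
      | some c => PySem.Set.contains seen (some c))).map Prod.snd
    PySem.List.slice picked none (some 3)

-- ===== PRECONDITION & SPEC =====
def Spec_fallback_get_suggestions (logs : List (List (String × String))) (out : List String) : Prop := out = fallback_get_suggestions_alt logs
instance (logs : List (List (String × String))) (out : List String) : Decidable (Spec_fallback_get_suggestions logs out) := by unfold Spec_fallback_get_suggestions; infer_instance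

-- ===== CLAIM (what is proved, stated in full; the proofs are below) =====
def Claim_equal_fallback_get_suggestions : Prop := ∀ (logs : List (List (String × String))), Dom_fallback_get_suggestions logs → Spec_fallback_get_suggestions logs (fallback_get_suggestions logs)

-- ===== LEMMAS AND PROOFS =====

-- for a trigger category c, membership in the early-exit scan's set is exactly
-- "c was already seen, or some log has category c" (the break only fires when both
-- triggers are in the set, so no trigger occurrence is ever skipped)
theorem pvScan_contains (c : Option String)
    (hc : c = some "emotion" ∨ c = some "shopping") :
    ∀ (logs : List (List (String × String))) (s : PySem.Set (Option String)),
      (c ∈ pvScan logs s ↔ c ∈ s ∨ ∃ l ∈ logs, pvCat l = c) := by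
  intro logs
  induction logs with
  | nil => intro s; simp [pvScan]
  | cons log rest ih =>
    intro s
    simp only [pvScan]
    split
    · rename_i hbrk
      rw [Bool.and_eq_true, PySem.Set.contains_iff, PySem.Set.contains_iff] at hbrk
      constructor
      · intro h
        rcases (PySem.Set.mem_add _ _ _).mp h with h' | h'
        · exact Or.inl h'
        · exact Or.inr ⟨log, List.mem_cons_self, h'.symm⟩
      · intro _
        rcases hc with rfl | rfl
        · exact hbrk.1
        · exact hbrk.2
    · rw [ih]
      rw [PySem.Set.mem_add]
      constructor
      · rintro ((h | h) | ⟨l, hl, hc'⟩)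
        · exact Or.inl h
        · exact Or.inr ⟨log, List.mem_cons_self, h.symm⟩
        · exact Or.inr ⟨l, List.mem_cons_of_mem _ hl, hc'⟩
      · rintro (h | ⟨l, hl, hc'⟩)
        · exact Or.inl (Or.inl h)
        · rcases List.mem_cons.mp hl with rfl | hl'
          · exact Or.inl (Or.inr hc'.symm)
          · exact Or.inr ⟨l, hl', hc'⟩

-- A's filtered-list nonemptiness states the same existence
theorem pv_filter_pos (logs : List (List (String × String))) (c : String) :
    0 < (logs.filter (fun log => pvCat log == some c)).length ↔
      ∃ l ∈ logs, pvCat l = some c := by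
  rw [List.length_pos_iff, Ne, List.filter_eq_nil_iff]
  push Not
  simp

-- ===== VERDICT (by name: the statement is the Claim_ definition above) =====
theorem fallback_get_suggestions_spec : Claim_equal_fallback_get_suggestions := by
  intro logs _
  unfold Spec_fallback_get_suggestions fallback_get_suggestions fallback_get_suggestions_alt
  by_cases h0 : logs.length = 0
  · rw [if_pos h0, if_pos h0]
  · rw [if_neg h0, if_neg h0]
    simp only [gt_iff_lt]
    have hE := (pvScan_contains (some "emotion") (Or.inl rfl) logs PySem.Set.empty)
    have hS := (pvScan_contains (some "shopping") (Or.inr rfl) logs PySem.Set.empty)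
    simp only [PySem.Set.empty, List.not_mem_nil, false_or] at hE hS
    by_cases he : ∃ l ∈ logs, pvCat l = some "emotion" <;>
    by_cases hs : ∃ l ∈ logs, pvCat l = some "shopping"
    all_goals {
      first
      | rw [if_pos ((pv_filter_pos logs "emotion").mpr he)]
      | rw [if_neg (fun h => he ((pv_filter_pos logs "emotion").mp h))]
      first
      | rw [if_pos ((pv_filter_pos logs "shopping").mpr hs)]
      | rw [if_neg (fun h => hs ((pv_filter_pos logs "shopping").mp h))]
      simp [pvMenu, hE, hS, he, hs]
    }
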